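-- pv_equiv track=rewrite | github.com/philthyharry/gdfplot | tests/helpers.py | permuate_dictionary_keys
-- ===== SOURCE A (Python) =====
-- import itertools as itr
--
-- def permuate_dictionary_keys(keys, values):
-- 	"""Given a list of keys and values generates a list of dictionaries with all
-- 	combinations of keys, used for the specified (fixed) number of values.
-- 	Number of keys must be equal to or greater than the number of values to cycle
-- 	through the possible combinations.
-- 	eg. keys=['a', 'b', 'c'] and values = [1, 2] will generate:
-- 	[{'a': 1, 'b': 2},
-- 	 {'a': 1, 'c': 2},
-- 	 {'b': 1, 'a': 2},
-- 	 {'b': 1, 'c': 2},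
-- 	 {'c': 1, 'a': 2},
-- 	 {'c': 1, 'b': 2}]
-- 	"""
-- 	n = len(values)
-- 	if len(keys) < n:
-- 		raise AttributeError('number of keys must be equal or greater '
-- 		                     'than the number of values provided')
-- 	result = []
-- 	for k in itr.permutations(keys, n):
-- 		result.append(dict(zip(k, values)))
-- 	return result
-- ===== SOURCE B (Python) =====
-- def permuate_dictionary_keys(keys, values):
--     """Iterative level-by-level expansion: start from one state (no keys chosen,
--     all keys remaining) and, once per value, expand every state by choosing each
--     remaining key in original order; finally zip each chosen tuple with values."""
--     n = len(values)
--     if len(keys) < n: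
--         raise AttributeError('number of keys must be equal or greater '
--                              'than the number of values provided')
--     states = [([], keys)]  # (chosen keys, remaining keys), kept in output order
--     for _ in range(n):
--         states = [(chosen + [rem[i]], rem[:i] + rem[i + 1:])
--                   for (chosen, rem) in states
--                   for i in range(len(rem))]
--     return [dict(zip(chosen, values)) for (chosen, _) in states]
-- ===== Notes on version B (the rewrite author's own statement) =====
-- stated objective: alternative
-- what changed: Replaces the itertools.permutations library call by an iterative level-by-level expansion of (chosen, remaining) states, one level per value, keeping the same left-to-right order; the raising guard is kept.
import Mathlib
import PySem

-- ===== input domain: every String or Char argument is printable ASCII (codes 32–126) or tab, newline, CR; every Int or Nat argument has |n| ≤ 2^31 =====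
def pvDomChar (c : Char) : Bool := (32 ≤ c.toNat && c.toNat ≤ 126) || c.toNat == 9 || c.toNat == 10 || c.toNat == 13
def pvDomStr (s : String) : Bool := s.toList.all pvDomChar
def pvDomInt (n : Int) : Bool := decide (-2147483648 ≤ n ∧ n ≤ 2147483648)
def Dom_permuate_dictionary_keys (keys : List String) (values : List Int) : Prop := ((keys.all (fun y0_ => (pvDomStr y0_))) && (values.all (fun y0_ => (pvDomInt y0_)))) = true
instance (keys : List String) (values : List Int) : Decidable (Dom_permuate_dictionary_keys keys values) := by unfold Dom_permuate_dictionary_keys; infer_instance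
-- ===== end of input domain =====

-- B replaces the itertools.permutations call by an iterative level-by-level state
-- expansion (choose each remaining key in original order, once per value); same
-- output order and values ('alternative', not claimed faster).


-- ===== PORT A =====
-- dict(zip(ks, vs)) as an insertion-ordered association list (both Pythons build it literally so)
def pvDictZip (ks : List String) (vs : List Int) : List (String × Int) :=
  (PySem.Dict.ofList (ks.zip vs)).items

def permuate_dictionary_keys (keys : List String) (values : List Int) : List (List (String × Int)) :=
  let n := values.length
  if keys.length < n then []  -- Python raises AttributeError here; excluded by Pre_
  else
    -- for k in itertools.permutations(keys, n): result.append(dict(zip(k, values)))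
    (PySem.List.permutations keys n).foldl (fun result k => result ++ [pvDictZip k values]) []

-- ===== PORT B =====
-- one expansion level: every state (chosen, rem) spawns, for each index i of rem in order,
-- (chosen + [rem[i]], rem[:i] + rem[i+1:])
def pvAltExpand (states : List (List String × List String)) : List (List String × List String) :=
  states.flatMap (fun p =>
    (PySem.List.pyRange 0 (p.2.length : Int) 1).map (fun i =>
      (p.1 ++ [PySem.List.pyGetD p.2 i ""],
       PySem.List.slice p.2 none (some i) ++ PySem.List.slice p.2 (some (i + 1)) none)))

def permuate_dictionary_keys_alt (keys : List String) (values : List Int) : List (List (String × Int)) :=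
  let n := values.length
  if keys.length < n then []  -- Source B raises AttributeError here; excluded by Pre_
  else
    let states := (List.range n).foldl (fun st _ => pvAltExpand st) [([], keys)]
    states.map (fun p => pvDictZip p.1 values)

-- ===== PRECONDITION & SPEC =====
-- A raises AttributeError iff len(keys) < len(values); exactly those inputs are excluded.
def Pre_permuate_dictionary_keys (keys : List String) (values : List Int) : Prop :=
  values.length ≤ keys.length
instance (keys : List String) (values : List Int) : Decidable (Pre_permuate_dictionary_keys keys values) := by unfold Pre_permuate_dictionary_keys; infer_instance
def pvWitness_permuate_dictionary_keys : List String × List Int := (["a", "b", "c"], [1, 2])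

def Spec_permuate_dictionary_keys (keys : List String) (values : List Int) (out : List (List (String × Int))) : Prop := out = permuate_dictionary_keys_alt keys values
instance (keys : List String) (values : List Int) (out : List (List (String × Int))) : Decidable (Spec_permuate_dictionary_keys keys values out) := by unfold Spec_permuate_dictionary_keys; infer_instance

-- ===== CLAIM (what is proved, stated in full; the proofs are below) =====
def Claim_equal_permuate_dictionary_keys : Prop := ∀ (keys : List String) (values : List Int), Dom_permuate_dictionary_keys keys values → Pre_permuate_dictionary_keys keys values → Spec_permuate_dictionary_keys keys values (permuate_dictionary_keys keys values)

-- ===== LEMMAS AND PROOFS =====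

theorem pv_perm_succ (xs : List String) (r : Nat) :
    PySem.List.permutations xs (r + 1)
      = (List.range xs.length).flatMap (fun i =>
          match xs[i]? with
          | none => []
          | some x => (PySem.List.permutations (xs.eraseIdx i) r).map (fun p => x :: p)) := by
  rw [PySem.List.permutations]
  apply List.flatMap_congr
  intro i _
  cases xs[i]? <;> rfl

theorem pv_flatMap_fst (st : List (List String × List String)) :
    st.flatMap (fun p => [p.1]) = st.map (·.1) := by
  induction st with
  | nil => rfl
  | cons p st ih => simp [List.flatMap_cons, ih]

-- a foldl that ignores the list elements is an iterate
theorem pv_foldl_ignore_iterate (l : List Nat) (st : List (List String × List String)) :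
    l.foldl (fun s _ => pvAltExpand s) st = pvAltExpand^[l.length] st := by
  induction l generalizing st with
  | nil => rfl
  | cons a l ih => simp [List.foldl_cons, ih, Function.iterate_succ_apply]

-- one expansion level of a single state produces exactly the (r+1)-permutations, per state
theorem pv_expand_one (c : List String) (xs : List String) (r : Nat) :
    (PySem.List.pyRange 0 (xs.length : Int) 1).flatMap (fun i =>
        (PySem.List.permutations
            (PySem.List.slice xs none (some i) ++ PySem.List.slice xs (some (i + 1)) none) r).map
          (fun q => (c ++ [PySem.List.pyGetD xs i ""]) ++ q))
      = (PySem.List.permutations xs (r + 1)).map (fun q => c ++ q) := by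
  rw [pv_perm_succ, List.map_flatMap, PySem.List.pyRange_zero_nat, List.flatMap_map]
  apply List.flatMap_congr
  intro i hi
  rw [List.mem_range] at hi
  have h1 : PySem.List.slice xs none (some (i : Int)) = xs.take i :=
    PySem.List.slice_to_natCast xs i
  have h2 : PySem.List.slice xs (some ((i : Int) + 1)) none = xs.drop (i + 1) := by
    have := PySem.List.slice_from_natCast xs (i + 1)
    push_cast at this ⊢
    exact this
  have h3 : PySem.List.pyGetD xs (i : Int) "" = xs[i] := by
    rw [PySem.List.pyGetD_natCast, List.getD_eq_getElem _ _ hi]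
  rw [h1, h2, h3, ← List.eraseIdx_eq_take_drop_succ, List.getElem?_eq_getElem hi]
  simp [List.map_map, Function.comp_def]

-- the invariant: the chosen components after r expansion levels are the r-permutations
theorem pv_iter_fst (r : Nat) (st : List (List String × List String)) :
    (pvAltExpand^[r] st).map (·.1)
      = st.flatMap (fun p => (PySem.List.permutations p.2 r).map (fun q => p.1 ++ q)) := by
  induction r generalizing st with
  | zero =>
    show st.map (·.1) = _
    rw [← pv_flatMap_fst st]
    apply List.flatMap_congr
    intro p _
    show [p.1] = (PySem.List.permutations p.2 0).map (fun q => p.1 ++ q)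
    simp [PySem.List.permutations]
  | succ r ih =>
    rw [Function.iterate_succ_apply, ih, pvAltExpand, List.flatMap_assoc]
    apply List.flatMap_congr
    intro p _
    rw [List.flatMap_map]
    exact pv_expand_one p.1 p.2 r

-- ===== VERDICT (by name: the statement is the Claim_ definition above) =====
theorem permuate_dictionary_keys_spec : Claim_equal_permuate_dictionary_keys := by
  intro keys values _ hpre
  unfold Spec_permuate_dictionary_keys permuate_dictionary_keys permuate_dictionary_keys_alt
  have hng : ¬ keys.length < values.length := not_lt.mpr hpre
  simp only [if_neg hng]
  rw [PySem.List.foldl_append_singleton_eq_map, List.nil_append, pv_foldl_ignore_iterate]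
  have hfst : (pvAltExpand^[(List.range values.length).length] [(([] : List String), keys)]).map
        (fun p => pvDictZip p.1 values)
      = ((pvAltExpand^[(List.range values.length).length] [(([] : List String), keys)]).map (·.1)).map
        (fun c => pvDictZip c values) := by rw [List.map_map]; rfl
  rw [hfst, pv_iter_fst]
  simp [List.length_range]
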